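-- pv_equiv track=rewrite | github.com/LiquidityC/aoc | 2015/day_11/main.py | check_doubles
-- ===== SOURCE A (Python) =====
-- def check_doubles(pwd):
--     count = 0
--     chars = []
--     doubles = [pwd[i:i+2] for i in range(len(pwd)-1)]
--     for a,b in doubles:
--         if a == b:
--             count += 1
--             chars.append(a)
--     return count == 2 and chars[0] != chars[1]
-- ===== SOURCE B (Python) =====
-- def check_doubles(pwd):
--     # Run-length pass: each maximal run of length L contributes L-1 pair characters.
--     chars = []
--     i = 0
--     n = len(pwd)
--     while i < n:
--         j = i
--         while j < n and pwd[j] == pwd[i]: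
--             j += 1
--         chars.extend(pwd[i] * (j - i - 1))
--         i = j
--     return len(chars) == 2 and chars[0] != chars[1]
-- ===== Notes on version B (the rewrite author's own statement) =====
-- stated objective: alternative
-- what changed: B does a run-length scan over maximal runs of equal characters (each run of length L contributes L-1 pair chars) instead of materialising all overlapping 2-character slices and scanning them.
import Mathlib
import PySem

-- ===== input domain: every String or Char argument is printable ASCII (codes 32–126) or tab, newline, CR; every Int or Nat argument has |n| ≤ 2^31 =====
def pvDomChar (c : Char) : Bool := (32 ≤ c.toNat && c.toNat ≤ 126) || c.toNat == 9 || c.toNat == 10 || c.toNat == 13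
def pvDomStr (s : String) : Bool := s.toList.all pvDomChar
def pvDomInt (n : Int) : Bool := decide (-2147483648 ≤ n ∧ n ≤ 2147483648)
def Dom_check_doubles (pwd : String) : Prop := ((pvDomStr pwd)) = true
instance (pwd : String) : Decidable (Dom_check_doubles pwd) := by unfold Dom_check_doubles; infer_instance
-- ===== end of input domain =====

-- B replaces A's scan of all overlapping 2-character slices by a run-length pass over
-- maximal runs of equal characters (alternative decomposition, same asymptotic cost).

-- ===== PORT A =====
-- literal transliteration of A: build the list of 2-char slices, fold the (count, chars) loop,
-- then `count == 2 and chars[0] != chars[1]` (the indexing is only reached when count == 2).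
def check_doubles (pwd : String) : Bool :=
  let cs := pwd.toList
  let doubles := (PySem.List.pyRange 0 ((cs.length : Int) - 1) 1).map
      (fun i => PySem.List.slice cs (some i) (some (i + 2)))
  let st := doubles.foldl
      (fun (st : Int × List Char) d =>
        match d with
        | [a, b] => if a = b then (st.1 + 1, st.2 ++ [a]) else st
        | _ => st)   -- unreachable: every slice here has exactly 2 characters
      (0, [])
  decide (st.1 = 2) &&
    (match PySem.List.pyGet? st.2 0, PySem.List.pyGet? st.2 1 with
     | some a, some b => decide (a ≠ b)
     | _, _ => false)   -- unreachable under the short-circuit: count == 2 gives two entries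

-- ===== PORT B =====
-- run-length pass of Source B: each maximal run of length L contributes L-1 copies of its character
def pvRunChars : List Char → List Char
  | [] => []
  | c :: rest =>
      List.replicate (rest.takeWhile (fun x => x = c)).length c ++
        pvRunChars (rest.dropWhile (fun x => x = c))
termination_by cs => cs.length
decreasing_by
  simp only [List.length_cons]
  exact Nat.lt_succ_of_le (List.length_dropWhile_le _ _)

def check_doubles_alt (pwd : String) : Bool :=
  let chars := pvRunChars pwd.toList
  decide (chars.length = 2) && decide (chars[0]? ≠ chars[1]?)

-- ===== PRECONDITION & SPEC =====
def Spec_check_doubles (pwd : String) (out : Bool) : Prop := out = check_doubles_alt pwd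
instance (pwd : String) (out : Bool) : Decidable (Spec_check_doubles pwd out) := by unfold Spec_check_doubles; infer_instance

-- ===== CLAIM (what is proved, stated in full; the proofs are below) =====
def Claim_equal_check_doubles : Prop := ∀ (pwd : String), Dom_check_doubles pwd → Spec_check_doubles pwd (check_doubles pwd)

-- ===== LEMMAS AND PROOFS =====

-- reference list: the characters of the adjacent equal pairs, in order
def adjChars : List Char → List Char
  | a :: b :: t => (if a = b then [a] else []) ++ adjChars (b :: t)
  | _ => []

-- B's run-length pass produces exactly the adjacent-equal-pair characters
lemma pvRunChars_eq_adjChars (cs : List Char) : pvRunChars cs = adjChars cs := by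
  induction cs using adjChars.induct with
  | case1 a b t ih =>
      by_cases h : a = b
      · subst h
        rw [pvRunChars]
        rw [pvRunChars] at ih
        simp only [List.takeWhile_cons, List.dropWhile_cons, decide_eq_true_eq] at *
        simp [adjChars, List.replicate_succ, ih]
      · rw [pvRunChars]
        simp [Ne.symm h, adjChars, ih, h]
  | case2 x h =>
      cases x with
      | nil => simp [pvRunChars, adjChars]
      | cons a t =>
          cases t with
          | nil => simp [pvRunChars, adjChars]
          | cons b t' => exact absurd rfl (h a b t')

-- A's list of 2-character slices is the list of adjacent pairs
lemma doubles_eq (cs : List Char) :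
    (PySem.List.pyRange 0 ((cs.length : Int) - 1) 1).map
      (fun i => PySem.List.slice cs (some i) (some (i + 2)))
    = (cs.zip cs.tail).map (fun p => [p.1, p.2]) := by
  rw [PySem.List.pyRange_one]
  apply List.ext_getElem
  · simp [List.length_zip]
  · intro k h1 h2
    simp only [List.getElem_map, List.getElem_range, List.getElem_zip, List.getElem_tail]
    have hk : k < cs.length - 1 := by simp at h1; omega
    have e1 : (0 : Int) + (k : Int) = ((k : Nat) : Int) := by ring
    have e2 : (k : Int) + 2 = (((k + 2) : Nat) : Int) := by push_cast; ring
    rw [e1, e2, PySem.List.slice_natCast]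
    have e3 : k + 2 - k = 2 := by omega
    rw [e3]
    rw [← List.getElem_cons_drop (by omega : k < cs.length),
        ← List.getElem_cons_drop (by omega : k + 1 < cs.length)]
    simp only [List.take_succ_cons, List.take_zero]

-- A's fold over the adjacent pairs accumulates exactly (count, chars) = (|adjChars|, adjChars)
lemma foldl_zip_adjChars (cs : List Char) (c0 : Int) (l0 : List Char) :
    (cs.zip cs.tail).foldl
      (fun (st : Int × List Char) p =>
        if p.1 = p.2 then (st.1 + 1, st.2 ++ [p.1]) else st) (c0, l0)
    = (c0 + (adjChars cs).length, l0 ++ adjChars cs) := by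
  induction cs using adjChars.induct generalizing c0 l0 with
  | case1 a b t ih =>
      have htail : (a :: b :: t).tail = b :: t := rfl
      have hz : (b :: t).zip t = (b :: t).zip (b :: t).tail := rfl
      rw [htail, List.zip_cons_cons, List.foldl_cons]
      by_cases h : a = b
      · subst h
        rw [hz, ih]
        simp only [adjChars, Prod.mk.injEq]
        refine ⟨by simp; ring, by simp⟩
      · simp only [if_neg h]
        rw [hz, ih]
        simp [adjChars, h]
  | case2 x h =>
      cases x with
      | nil => simp [adjChars]
      | cons a t =>
          cases t with
          | nil => simp [adjChars]
          | cons b t' => exact absurd rfl (h a b t')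

-- the two final `count == 2 and chars[0] != chars[1]` renderings agree on any chars list
lemma final_eq (l : List Char) :
    (decide ((0 : Int) + (l.length : Int) = 2) &&
      (match PySem.List.pyGet? l 0, PySem.List.pyGet? l 1 with
       | some a, some b => decide (a ≠ b)
       | _, _ => false))
    = (decide (l.length = 2) && decide (l[0]? ≠ l[1]?)) := by
  have h : ((0 : Int) + (l.length : Int) = 2) ↔ (l.length = 2) := by omega
  rw [show decide ((0 : Int) + (l.length : Int) = 2) = decide (l.length = 2) from
    decide_eq_decide.mpr h]
  match l with
  | [] => rfl
  | [a] => rfl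
  | a :: b :: t =>
      simp [PySem.List.pyGet?, PySem.List.pyIdx?,
        show (0 : Int) ≤ (t.length : Int) + 1 by positivity]

-- ===== VERDICT (by name: the statement is the Claim_ definition above) =====
theorem check_doubles_spec : Claim_equal_check_doubles := by
  intro pwd _
  simp only [Spec_check_doubles, check_doubles, check_doubles_alt]
  rw [doubles_eq, List.foldl_map]
  rw [show (fun (st : Int × List Char) (p : Char × Char) =>
        (match [p.1, p.2] with
         | [a, b] => if a = b then (st.1 + 1, st.2 ++ [a]) else st
         | _ => st))
      = (fun (st : Int × List Char) p =>
          if p.1 = p.2 then (st.1 + 1, st.2 ++ [p.1]) else st) from rfl]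
  rw [foldl_zip_adjChars, pvRunChars_eq_adjChars]
  simpa using final_eq (adjChars pwd.toList)
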